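-- pv_equiv track=rewrite | github.com/adarshkumar8225/python_nptel | solution1.py | threesquares
-- ===== SOURCE A (Python) =====
-- def threesquares(m):
--   if(m<0):
--     return(False)
--   else :
--       for i in range(0,m):
--         for j in range(0,m):
--           if(m==(4**i *(8*j+7))):
--             return(False)
--       return(True)
-- ===== SOURCE B (Python) =====
-- def threesquares(m):
--     # Legendre: m is a sum of three squares iff m is not 4^i*(8j+7).
--     if m < 0:
--         return False
--     while m > 0 and m % 4 == 0:
--         m //= 4
--     return m % 8 != 7
-- ===== Notes on version B (the rewrite author's own statement) =====
-- stated objective: simpler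
-- what changed: Replaced the O(m^2) double loop searching for a 4^i*(8j+7) representation with the direct Legendre test: strip factors of 4, then check the remainder mod 8 against 7.
import Mathlib
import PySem

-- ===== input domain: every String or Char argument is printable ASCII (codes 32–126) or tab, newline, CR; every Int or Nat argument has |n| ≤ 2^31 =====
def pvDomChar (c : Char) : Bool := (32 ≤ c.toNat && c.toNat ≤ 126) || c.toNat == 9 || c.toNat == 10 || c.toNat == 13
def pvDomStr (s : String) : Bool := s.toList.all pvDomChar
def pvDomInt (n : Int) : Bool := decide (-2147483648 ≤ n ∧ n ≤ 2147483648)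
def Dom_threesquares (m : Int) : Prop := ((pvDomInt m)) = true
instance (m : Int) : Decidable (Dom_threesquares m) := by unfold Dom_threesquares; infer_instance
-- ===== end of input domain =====

-- B replaces A's O(m^2) double search for a 4^i*(8j+7) representation by the direct
-- Legendre test (strip factors of 4, check the remainder mod 8); objective: simpler.

-- ===== PORT A =====
-- Nested 'for' loops with early 'return False' port as short-circuiting List.any;
-- i ≥ 0 on pyRange 0 m 1, so 4**i is 4 ^ i.toNat.
def threesquares (m : Int) : Bool :=
  if m < 0 then false
  else
    ! ((PySem.List.pyRange 0 m 1).any (fun i =>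
        (PySem.List.pyRange 0 m 1).any (fun j =>
          m == 4 ^ i.toNat * (8 * j + 7))))

-- ===== PORT B =====
-- the 'while m > 0 and m % 4 == 0: m //= 4' loop of Source B
def strip4 (m : Int) : Int :=
  if h : m > 0 ∧ PySem.Int.mod m 4 = 0 then  -- h used by decreasing_by
    strip4 (PySem.Int.floordiv m 4)
  else m
termination_by m.toNat
decreasing_by
  rw [PySem.Int.floordiv_eq_ediv_of_pos (by norm_num : (0:Int) < 4)]
  have h2 := (PySem.Int.mod_eq_zero_iff_dvd m 4).mp h.2
  omega

def threesquares_alt (m : Int) : Bool :=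
  if m < 0 then false
  else PySem.Int.mod (strip4 m) 8 != 7

-- ===== PRECONDITION & SPEC =====
def Spec_threesquares (m : Int) (out : Bool) : Prop := out = threesquares_alt m
instance (m : Int) (out : Bool) : Decidable (Spec_threesquares m out) := by unfold Spec_threesquares; infer_instance

-- ===== CLAIM (what is proved, stated in full; the proofs are below) =====
def Claim_equal_threesquares : Prop := ∀ (m : Int), Dom_threesquares m → Spec_threesquares m (threesquares m)

-- ===== LEMMAS AND PROOFS =====

-- B's loop result characterises the existence of a 4^i*(8j+7) representation.
theorem strip_spec (m : Int) (h0 : 0 ≤ m) :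
    PySem.Int.mod (strip4 m) 8 = 7 ↔ ∃ i j : ℕ, m = 4 ^ i * (8 * (j:Int) + 7) := by
  rw [strip4]
  split_ifs with h
  · obtain ⟨q, hq⟩ := (PySem.Int.mod_eq_zero_iff_dvd m 4).mp h.2
    have hfd : PySem.Int.floordiv m 4 = q := by
      rw [PySem.Int.floordiv_eq_ediv_of_pos (by norm_num : (0:Int) < 4)]; omega
    have hq0 : 0 ≤ q := by omega
    rw [hfd, strip_spec q hq0]
    constructor
    · rintro ⟨i, j, rfl⟩
      exact ⟨i + 1, j, by rw [hq]; ring⟩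
    · rintro ⟨i, j, hij⟩
      cases i with
      | zero => exfalso; simp only [pow_zero, one_mul] at hij; omega
      | succ i =>
        refine ⟨i, j, ?_⟩
        have : (4:Int) * q = 4 * (4 ^ i * (8 * (j:Int) + 7)) := by
          rw [← hq, hij]; ring
        linarith
  · -- loop exits: m = 0, or m > 0 with 4 ∤ m
    rcases lt_or_eq_of_le h0 with hm | hm
    · have hnd : ¬ (4:Int) ∣ m := fun hd => h ⟨hm, (PySem.Int.mod_eq_zero_iff_dvd m 4).mpr hd⟩
      rw [PySem.Int.mod_eq_emod_of_pos (by norm_num : (0:Int) < 8)]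
      constructor
      · intro h8
        refine ⟨0, ((m - 7) / 8).toNat, ?_⟩
        have : (0:Int) ≤ (m - 7) / 8 := by omega
        push_cast [Int.toNat_of_nonneg this]
        omega
      · rintro ⟨i, j, hij⟩
        cases i with
        | zero => simp only [pow_zero, one_mul] at hij; omega
        | succ i =>
          exfalso; apply hnd
          exact ⟨4 ^ i * (8 * (j:Int) + 7), by rw [hij]; ring⟩
    · subst hm
      constructor
      · intro h8; simp [PySem.Int.mod] at h8
      · rintro ⟨i, j, hij⟩
        have h4 : (0:Int) < 4 ^ i := by positivity
        nlinarith
termination_by m.toNat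
decreasing_by
  have h2 := (PySem.Int.mod_eq_zero_iff_dvd m 4).mp h.2
  omega

-- A's bounded double search finds a representation iff one exists at all
-- (any witness i, j is automatically < m).
theorem any_iff (m : Int) (h0 : 0 ≤ m) :
    ((PySem.List.pyRange 0 m 1).any (fun i =>
        (PySem.List.pyRange 0 m 1).any (fun j =>
          m == 4 ^ i.toNat * (8 * j + 7))) = true)
    ↔ ∃ i j : ℕ, m = 4 ^ i * (8 * (j:Int) + 7) := by
  simp only [List.any_eq_true, PySem.List.mem_pyRange_one, beq_iff_eq]
  constructor
  · rintro ⟨i, ⟨hi0, _⟩, j, ⟨hj0, _⟩, heq⟩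
    refine ⟨i.toNat, j.toNat, ?_⟩
    rw [heq, Int.toNat_of_nonneg hj0]
  · rintro ⟨i, j, rfl⟩
    have hip : (i:ℕ) < 4 ^ i := Nat.lt_pow_self (by norm_num)
    have hip' : (i:Int) < 4 ^ i := by exact_mod_cast hip
    have h7 : (7:Int) ≤ 8 * (j:Int) + 7 := by omega
    have h4 : (1:Int) ≤ 4 ^ i := one_le_pow₀ (by norm_num)
    refine ⟨(i:Int), ⟨by omega, by nlinarith⟩,
            (j:Int), ⟨by omega, by nlinarith⟩, ?_⟩
    simp

-- ===== VERDICT (by name: the statement is the Claim_ definition above) =====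
theorem threesquares_spec : Claim_equal_threesquares := by
  intro m _
  unfold Spec_threesquares threesquares threesquares_alt
  split_ifs with hm
  · rfl
  · rw [not_lt] at hm
    have key := (any_iff m hm).trans (strip_spec m hm).symm
    simp only [bne]
    congr 1
    rw [Bool.eq_iff_iff, key]
    simp
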